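-- pv_equiv track=rewrite | github.com/catinprogress/nxdomain | recursor.py | check_alphanumeric
-- ===== SOURCE A (Python) =====
-- def check_alphanumeric(name: str) -> bool:
--     if "-" in name:
--         remove_hyphen = name.split("-")
--         is_valid = False
--         for check in remove_hyphen:
--             if check.isalnum() or (len(check) == 0):
--                 is_valid = True
--             else:
--                 is_valid = False
--                 break
--         if is_valid:
--             return True
--     elif name.isalnum():
--         return True
--
--     return False
-- ===== SOURCE B (Python) =====
-- def check_alphanumeric(name: str) -> bool:
--     # Single left-to-right character scan: no split, no per-part loop.
--     if not name:
--         return False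
--     return all(c.isalnum() or c == '-' for c in name)
-- ===== Notes on version B (the rewrite author's own statement) =====
-- stated objective: simpler
-- what changed: Replaces the split-on-hyphen plus per-part validation loop (with break and a leftover flag) by an empty-string guard and a single character scan accepting alphanumerics and hyphens.
import Mathlib
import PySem

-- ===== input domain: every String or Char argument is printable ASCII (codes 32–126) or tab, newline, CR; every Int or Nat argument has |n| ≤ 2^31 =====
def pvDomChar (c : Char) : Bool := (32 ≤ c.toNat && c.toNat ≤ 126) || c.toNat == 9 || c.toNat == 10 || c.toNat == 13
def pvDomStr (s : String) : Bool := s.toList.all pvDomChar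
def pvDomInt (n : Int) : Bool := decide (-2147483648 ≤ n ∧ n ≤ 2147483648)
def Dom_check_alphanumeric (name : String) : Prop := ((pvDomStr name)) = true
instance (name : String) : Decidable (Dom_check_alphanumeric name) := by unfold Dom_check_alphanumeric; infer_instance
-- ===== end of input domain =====

-- B replaces A's split-on-hyphen plus per-part validation loop by an empty-string guard
-- and a single character scan accepting alphanumerics and hyphens; objective: simpler.

-- ===== PORT A =====
-- A's 'for check in remove_hyphen' loop with its is_valid flag and break
def caLoop : List String → Bool → Bool
  | [], is_valid => is_valid
  | check :: rest, _ =>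
      if PySem.Str.strIsalnum check || PySem.Str.len check == 0 then caLoop rest true
      else false

def check_alphanumeric (name : String) : Bool :=
  if PySem.Str.isIn "-" name then
    match PySem.Str.split? name "-" with
    | some remove_hyphen =>            -- always `some`: the separator "-" is non-empty
        if caLoop remove_hyphen false then true else false
    | none => false
  else if PySem.Str.strIsalnum name then true
  else false

-- ===== PORT B =====
def check_alphanumeric_alt (name : String) : Bool :=
  if name = "" then false
  else name.toList.all (fun c => PySem.Chars.isalnum c || c == '-')

-- ===== PRECONDITION & SPEC =====
def Spec_check_alphanumeric (name : String) (out : Bool) : Prop := out = check_alphanumeric_alt name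
instance (name : String) (out : Bool) : Decidable (Spec_check_alphanumeric name out) := by unfold Spec_check_alphanumeric; infer_instance

-- ===== CLAIM (what is proved, stated in full; the proofs are below) =====
def Claim_equal_check_alphanumeric : Prop := ∀ (name : String), Dom_check_alphanumeric name → Spec_check_alphanumeric name (check_alphanumeric name)

-- ===== LEMMAS AND PROOFS =====

theorem all_congr_mem {α : Type} (l : List α) (p q : α → Bool)
    (h : ∀ x ∈ l, p x = q x) : l.all p = l.all q := by
  induction l with
  | nil => rfl
  | cons x xs ih =>
      simp only [List.all_cons, h x (List.mem_cons_self), ih (fun y hy => h y (List.mem_cons_of_mem _ hy))]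

-- a split part passes A's test  iff  all its characters are alphanumeric
theorem caOk_eq (s : String) :
    (PySem.Str.strIsalnum s || PySem.Str.len s == 0) = s.toList.all PySem.Chars.isalnum := by
  cases h : s.toList with
  | nil => simp [PySem.Str.strIsalnum_eq, PySem.Chars.strIsalnum, PySem.Str.len_eq, h]
  | cons c cs =>
      simp only [PySem.Str.strIsalnum_eq, PySem.Chars.strIsalnum, PySem.Str.len_eq, h]
      simp
      intro hlen
      omega

theorem caLoop_eq (ps : List String) (p : String) (v : Bool) :
    caLoop (p :: ps) v = (p :: ps).all (fun q => q.toList.all PySem.Chars.isalnum) := by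
  induction ps generalizing p v with
  | nil =>
      show (if _ then caLoop [] true else false) = _
      rw [caOk_eq]; split_ifs with h <;> simp [caLoop, h]
  | cons q qs ih =>
      show (if _ then caLoop (q :: qs) true else false) = _
      rw [caOk_eq]
      split_ifs with h
      · rw [ih]; simp [h]
      · simp [h]

-- one unfolding step of PySem.Chars.splitOn.go on a cons with positive fuel
theorem go_step (f : Nat) (c : Char) (rest cur : List Char) (acc : List (List Char)) :
    PySem.Chars.splitOn.go ['-'] (f + 1) (c :: rest) cur acc
      = if ['-'].isPrefixOf (c :: rest) then
          PySem.Chars.splitOn.go ['-'] f (List.drop ['-'].length (c :: rest)) [] (cur.reverse :: acc)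
        else PySem.Chars.splitOn.go ['-'] f rest (c :: cur) acc := rfl

theorem splitOn_go_ne_nil (fuel : Nat) (l cur : List Char) (acc : List (List Char)) :
    PySem.Chars.splitOn.go ['-'] fuel l cur acc ≠ [] := by
  induction fuel generalizing l cur acc with
  | zero => rw [PySem.Chars.splitOn.go.eq_def]; simp
  | succ f ih =>
      cases l with
      | nil =>
          show ((cur.reverse :: acc).reverse : List (List Char)) ≠ []
          simp
      | cons c rest =>
          rw [go_step]
          split_ifs with h
          · exact ih _ _ _
          · exact ih _ _ _

theorem splitOn_go_all (fuel : Nat) (l cur : List Char) (acc : List (List Char))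
    (hf : l.length < fuel) :
    (PySem.Chars.splitOn.go ['-'] fuel l cur acc).all (fun p => p.all PySem.Chars.isalnum)
      = (acc.all (fun p => p.all PySem.Chars.isalnum) && cur.all PySem.Chars.isalnum
          && l.all (fun c => PySem.Chars.isalnum c || c == '-')) := by
  induction fuel generalizing l cur acc with
  | zero => omega
  | succ f ih =>
      cases l with
      | nil =>
          show ((cur.reverse :: acc).reverse : List (List Char)).all _ = _
          simp [Bool.and_comm]
      | cons c rest =>
          simp only [List.length_cons] at hf
          rw [go_step]
          by_cases h : c = '-'
          · subst h
            rw [if_pos (by simp [List.isPrefixOf])]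
            rw [ih _ _ _ (by simp; omega)]
            simp only [List.all_cons, List.all_reverse, List.all_nil, Bool.and_true,
              Bool.true_and, BEq.rfl, Bool.or_true]
            ac_rfl
          · rw [if_neg (by simp [List.isPrefixOf]; exact fun hh => h hh.symm)]
            rw [ih _ _ _ (by omega)]
            have hc : (c == '-') = false := beq_eq_false_iff_ne.mpr h
            simp only [List.all_cons, hc, Bool.or_false]
            ac_rfl

-- ===== VERDICT (by name: the statement is the Claim_ definition above) =====
theorem check_alphanumeric_spec : Claim_equal_check_alphanumeric := by
  intro name _
  unfold Spec_check_alphanumeric check_alphanumeric check_alphanumeric_alt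
  cases hin : PySem.Str.isIn "-" name with
  | false =>
      have hchars : PySem.Chars.isIn "-".toList name.toList = false := by
        rw [← PySem.Str.isIn_eq]; exact hin
      rw [PySem.Chars.isIn_eq_false_iff] at hchars
      have hmem : '-' ∉ name.toList := fun hm =>
        hchars ((List.singleton_infix_iff _ _).mpr hm)
      simp only [Bool.false_eq_true, if_false]
      by_cases hnil : name = ""
      · subst hnil; simp [PySem.Str.strIsalnum_eq, PySem.Chars.strIsalnum]
      · rw [if_neg hnil]
        have htl : name.toList ≠ [] := fun h => hnil (String.toList_eq_nil_iff.mp h)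
        rw [PySem.Str.strIsalnum_eq, PySem.Chars.strIsalnum]
        have : name.toList.all PySem.Chars.isalnum
            = name.toList.all (fun c => PySem.Chars.isalnum c || c == '-') :=
          all_congr_mem _ _ _ (fun c hc => by
            have : c ≠ '-' := fun h => hmem (h ▸ hc)
            simp [this])
        rw [← this]
        have hne : name.toList.isEmpty = false := by simp [htl]
        rw [hne]
        cases h2 : name.toList.all PySem.Chars.isalnum <;> rfl
  | true =>
      have hchars : PySem.Chars.isIn "-".toList name.toList = true := by
        rw [← PySem.Str.isIn_eq]; exact hin
      have hmem : '-' ∈ name.toList := by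
        have := (PySem.Chars.isIn_iff_infix _ _).mp hchars
        exact (List.singleton_infix_iff _ _).mp this
      have htl : name.toList ≠ [] := by intro h; rw [h] at hmem; simp at hmem
      have hnil : name ≠ "" := fun h => htl (by simp [h])
      simp only [if_true]
      rw [if_neg hnil]
      rw [PySem.Str.split?]
      rw [PySem.Chars.split?]
      rw [if_neg (by simp)]
      cases hsp : PySem.Chars.splitOn name.toList "-".toList with
      | nil =>
          exfalso
          rw [PySem.Chars.splitOn] at hsp
          exact splitOn_go_ne_nil _ _ _ _ (by simpa using hsp)
      | cons p ps =>
          simp only [Option.map_some, List.map_cons]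
          rw [caLoop_eq]
          rw [← List.map_cons, List.all_map]
          have : ((fun q => String.toList q |>.all PySem.Chars.isalnum) ∘ String.ofList)
              = (fun p : List Char => p.all PySem.Chars.isalnum) := by
            funext x; simp [Function.comp, String.toList_ofList]
          rw [this, ← hsp]
          rw [PySem.Chars.splitOn]
          rw [show "-".toList = ['-'] from rfl]
          rw [splitOn_go_all _ _ _ _ (by omega)]
          simp only [List.all_nil, Bool.true_and]
          cases hall : name.toList.all (fun c => PySem.Chars.isalnum c || c == '-') <;> rfl
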